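-- pv_equiv track=rewrite | github.com/Khanhnvtb/Virtual_Asstistant | virtual_assistant.py | textWiki
-- ===== SOURCE A (Python) =====
-- def textWiki(content):
--     words = content.split()
--     cnt = 0
--     txt = ''
--     for word in words:
--         cnt += 1
--         txt += word + ' '
--         if cnt == 8:
--             txt += '\n'
--             cnt = 0
--     return txt
-- ===== SOURCE B (Python) =====
-- def textWiki(content):
--     words = content.split()
--     parts = []
--     while words:
--         chunk = words[:8]
--         words = words[8:]
--         parts.append(' '.join(chunk) + ' ')
--         if len(chunk) == 8:
--             parts.append('\n')
--     return ''.join(parts)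
-- ===== Notes on version B (the rewrite author's own statement) =====
-- stated objective: alternative
-- what changed: Replaces the per-word counter-and-branch loop with repeated string concatenation by a chunk-wise traversal: slice off eight words at a time, join each chunk with single spaces plus a trailing space (and a newline after a full chunk), collect the pieces in a list and join them once at the end.
import Mathlib
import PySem

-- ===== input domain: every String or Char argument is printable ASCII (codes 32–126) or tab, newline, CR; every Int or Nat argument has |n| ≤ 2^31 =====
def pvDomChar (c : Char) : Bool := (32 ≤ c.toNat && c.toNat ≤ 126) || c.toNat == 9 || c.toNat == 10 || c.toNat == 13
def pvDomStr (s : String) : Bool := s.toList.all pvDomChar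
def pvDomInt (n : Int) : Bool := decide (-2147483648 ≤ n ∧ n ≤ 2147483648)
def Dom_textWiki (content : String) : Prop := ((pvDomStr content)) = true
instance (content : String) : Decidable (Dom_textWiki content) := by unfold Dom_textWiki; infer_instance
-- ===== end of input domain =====

-- B replaces A's per-word counter-and-branch concatenation loop by a chunk-wise
-- slice/join traversal that collects the pieces and joins them once (objective: alternative).

-- ===== PORT A =====
-- the body of A's 'for word in words' loop, on state (cnt, txt)
def twStep (st : Int × String) (word : String) : Int × String :=
  let cnt := st.1 + 1
  let txt := st.2 ++ (word ++ " ")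
  if cnt = 8 then (0, txt ++ "\n") else (cnt, txt)

def textWiki (content : String) : String :=
  let words := PySem.Str.split₀ content
  (words.foldl twStep ((0 : Int), "")).2

-- ===== PORT B =====
-- Source B's 'while words:' loop: slice off the first 8 words, emit ' '.join(chunk) + ' '
-- and, when the chunk is full, '\n'; the emitted pieces in order (parts.append = cons)
def twChunks (ws : List String) : List String :=
  if h : ws = [] then []
  else
    let chunk := PySem.List.slice ws none (some 8)
    let rest := twChunks (PySem.List.slice ws (some 8) none)
    if chunk.length = 8 then (PySem.Str.join " " chunk ++ " ") :: "\n" :: rest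
    else (PySem.Str.join " " chunk ++ " ") :: rest
termination_by ws.length
decreasing_by
  simp [pysem]
  exact List.length_pos_of_ne_nil h

def textWiki_alt (content : String) : String :=
  PySem.Str.join "" (twChunks (PySem.Str.split₀ content))

-- ===== PRECONDITION & SPEC =====
def Spec_textWiki (content : String) (out : String) : Prop := out = textWiki_alt content
instance (content : String) (out : String) : Decidable (Spec_textWiki content out) := by unfold Spec_textWiki; infer_instance

-- ===== CLAIM (what is proved, stated in full; the proofs are below) =====
def Claim_equal_textWiki : Prop := ∀ (content : String), Dom_textWiki content → Spec_textWiki content (textWiki content)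

-- ===== LEMMAS AND PROOFS =====

-- spaced concatenation of words: the txt A's loop builds across one chunk
def twSp : List String → String
  | [] => ""
  | w :: rest => w ++ " " ++ twSp rest

lemma join_empty_cons (x : String) (l : List String) :
    PySem.Str.join "" (x :: l) = x ++ PySem.Str.join "" l := by
  apply String.toList_inj.mp
  cases l with
  | nil => simp [PySem.Str.toList_join, PySem.Chars.join_singleton, PySem.Chars.join_nil]
  | cons y t => simp [PySem.Str.toList_join, PySem.Chars.join_cons_cons]

lemma twSp_eq_join (w : String) (rest : List String) :
    twSp (w :: rest) = PySem.Str.join " " (w :: rest) ++ " " := by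
  induction rest generalizing w with
  | nil =>
    apply String.toList_inj.mp
    simp [twSp, PySem.Str.toList_join, PySem.Chars.join_singleton]
  | cons y t ih =>
    apply String.toList_inj.mp
    have := congrArg String.toList (ih y)
    simp [twSp, PySem.Str.toList_join, PySem.Chars.join_cons_cons] at this ⊢
    simp [this]


lemma join_empty_nil : PySem.Str.join "" ([] : List String) = "" := by
  apply String.toList_inj.mp
  simp [PySem.Str.toList_join, PySem.Chars.join_nil]

lemma twChunks_ne (ws : List String) (h : ¬ ws = []) : twChunks ws =
    if (ws.take 8).length = 8 then
      (PySem.Str.join " " (ws.take 8) ++ " ") :: "\n" :: twChunks (ws.drop 8)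
    else (PySem.Str.join " " (ws.take 8) ++ " ") :: twChunks (ws.drop 8) := by
  rw [twChunks]
  simp [pysem, h]

lemma foldl_small (ws : List String) (c : Int) (txt : String)
    (h : c + ws.length < 8) :
    List.foldl twStep (c, txt) ws = (c + ws.length, txt ++ twSp ws) := by
  induction ws generalizing c txt with
  | nil => simp [twSp]
  | cons w rest ih =>
    have hne : ¬ (c + 1 = 8) := by simp at h; omega
    simp only [List.foldl, twStep, hne, if_false]
    rw [ih (c + 1) _ (by simp at h ⊢; omega)]
    simp only [Prod.mk.injEq]
    constructor
    · simp; omega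
    · simp [twSp, String.append_assoc]

lemma foldl_full (ws : List String) (txt : String) (h : ws.length = 8) :
    List.foldl twStep ((0 : Int), txt) ws = (0, txt ++ twSp ws ++ "\n") := by
  rcases ws with _ | ⟨a, _ | ⟨b, _ | ⟨c, _ | ⟨d, _ | ⟨e, _ | ⟨f, _ | ⟨g, _ | ⟨h8, _ | ⟨i, tl⟩⟩⟩⟩⟩⟩⟩⟩⟩ <;>
    simp at h
  simp [List.foldl, twStep, twSp, String.append_assoc]

lemma foldl_chunks (ws : List String) (txt : String) :
    (List.foldl twStep ((0 : Int), txt) ws).2 = txt ++ PySem.Str.join "" (twChunks ws) := by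
  by_cases hws : ws = []
  · subst hws
    simp [twChunks, join_empty_nil]
  · rw [twChunks_ne ws hws]
    by_cases hlen : ws.length < 8
    · rw [foldl_small ws 0 txt (by simp; omega)]
      have htake : List.take 8 ws = ws := List.take_of_length_le (by omega)
      have hdrop : List.drop 8 ws = [] := List.drop_eq_nil_of_le (by omega)
      have h8 : ¬ ((ws.take 8).length = 8) := by rw [htake]; omega
      rw [if_neg h8, htake, hdrop]
      rw [join_empty_cons]
      obtain ⟨w, rest, rfl⟩ := List.exists_cons_of_ne_nil hws
      simp [twChunks, join_empty_nil, twSp_eq_join]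
    · have hlen' : 8 ≤ ws.length := by omega
      have htl : (List.take 8 ws).length = 8 := by simp; omega
      conv_lhs => rw [← List.take_append_drop 8 ws]
      rw [List.foldl_append, foldl_full _ txt htl,
          foldl_chunks (List.drop 8 ws) (txt ++ twSp (List.take 8 ws) ++ "\n")]
      rw [if_pos htl, join_empty_cons, join_empty_cons]
      obtain ⟨w, rest, hcons⟩ := List.exists_cons_of_ne_nil (l := List.take 8 ws)
        (by intro hc; rw [hc] at htl; simp at htl)
      rw [hcons, twSp_eq_join, ← hcons]
      simp only [String.append_assoc]
termination_by ws.length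
decreasing_by
  have hpos := List.length_pos_of_ne_nil hws
  simp
  omega

-- ===== VERDICT (by name: the statement is the Claim_ definition above) =====
theorem textWiki_spec : Claim_equal_textWiki := by
  intro content _
  unfold Spec_textWiki textWiki textWiki_alt
  exact foldl_chunks (PySem.Str.split₀ content) ""
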